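-- pv_equiv track=rewrite | github.com/Lee-han-seok/Algorithm-Baekjoon | 프로그래머스/1/86491. 최소직사각형/최소직사각형.py | solution
-- ===== SOURCE A (Python) =====
-- def solution(sizes):
--     answer = 0
--     h = []
--     l = []
--     for i in range(len(sizes)) :
--         h.append(max(sizes[i]))
--         l.append(min(sizes[i]))
--     answer = max(h) * max(l)
--     return answer
-- ===== SOURCE B (Python) =====
-- def solution(sizes):
--     # Divide and conquer: recursively compute, for a block of cards, the pair
--     # (largest longer-side, largest shorter-side); combine halves with max.
--     def rect(lo, hi):
--         if lo + 1 == hi: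
--             card = sizes[lo]
--             return max(card), min(card)
--         mid = (lo + hi) // 2
--         h1, l1 = rect(lo, mid)
--         h2, l2 = rect(mid, hi)
--         return max(h1, h2), max(l1, l2)
--     h, l = rect(0, len(sizes))
--     return h * l
-- ===== Notes on version B (the rewrite author's own statement) =====
-- stated objective: alternative
-- what changed: Replaces A's build-two-lists-then-reduce scan by a divide-and-conquer recursion that splits the card index range in half and combines each half's (largest longer-side, largest shorter-side) pair with max, multiplying only at the top.
import Mathlib
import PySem

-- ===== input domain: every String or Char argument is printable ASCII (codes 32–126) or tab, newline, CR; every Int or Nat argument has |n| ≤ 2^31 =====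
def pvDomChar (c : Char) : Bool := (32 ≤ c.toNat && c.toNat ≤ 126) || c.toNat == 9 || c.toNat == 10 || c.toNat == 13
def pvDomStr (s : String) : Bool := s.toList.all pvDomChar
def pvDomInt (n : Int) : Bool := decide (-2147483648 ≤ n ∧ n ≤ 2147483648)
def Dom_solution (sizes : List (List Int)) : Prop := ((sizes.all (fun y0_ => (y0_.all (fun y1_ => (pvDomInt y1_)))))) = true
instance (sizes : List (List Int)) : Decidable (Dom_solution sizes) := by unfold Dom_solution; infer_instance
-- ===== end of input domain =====

-- B replaces A's build-two-lists-then-reduce scan by a divide-and-conquer recursion over index ranges (alternative decomposition, O(log n) stack).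


-- ===== PORT A =====
def solution (sizes : List (List Int)) : Int :=
  let hl := (PySem.List.pyRange 0 sizes.length 1).foldl
    (fun (p : List Int × List Int) i =>
      (p.1 ++ [(PySem.List.max? (PySem.List.pyGetD sizes i []) (fun y => y)).getD 0],
       p.2 ++ [(PySem.List.min? (PySem.List.pyGetD sizes i []) (fun y => y)).getD 0])) ([], [])
  ((PySem.List.max? hl.1 (fun y => y)).getD 0) * ((PySem.List.max? hl.2 (fun y => y)).getD 0)

-- ===== PORT B =====
-- B's inner recursion `rect(lo, hi)`.  `fuel` (= hi - lo ≥ depth at the top call) and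
-- the `hi ≤ lo` guard only make the recursion total (Python diverges there, reachable
-- only for empty `sizes`, outside Pre_); they never change a computed value.
def pvRect (sizes : List (List Int)) (fuel lo hi : Nat) : Int × Int :=
  match fuel with
  | 0 => (0, 0)
  | fuel + 1 =>
    if hi ≤ lo then (0, 0)
    else if lo + 1 = hi then
      let card := PySem.List.pyGetD sizes (lo : Int) []
      ((PySem.List.max? card (fun y => y)).getD 0, (PySem.List.min? card (fun y => y)).getD 0)
    else
      let mid := (lo + hi) / 2
      let p1 := pvRect sizes fuel lo mid
      let p2 := pvRect sizes fuel mid hi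
      (max p1.1 p2.1, max p1.2 p2.2)

def solution_alt (sizes : List (List Int)) : Int :=
  let p := pvRect sizes sizes.length 0 sizes.length
  p.1 * p.2

-- ===== PRECONDITION & SPEC =====
-- Pre_ excludes exactly the inputs where Python A raises ValueError — an empty sizes list or an empty card — and Python B raises there too (RecursionError resp. ValueError).
def Pre_solution (sizes : List (List Int)) : Prop := sizes ≠ [] ∧ ∀ s ∈ sizes, s ≠ []
instance (sizes : List (List Int)) : Decidable (Pre_solution sizes) := by unfold Pre_solution; infer_instance
def pvWitness_solution : List (List Int) := [[3, 5], [2, 4]]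

def Spec_solution (sizes : List (List Int)) (out : Int) : Prop := out = solution_alt sizes
instance (sizes : List (List Int)) (out : Int) : Decidable (Spec_solution sizes out) := by unfold Spec_solution; infer_instance

-- ===== CLAIM (what is proved, stated in full; the proofs are below) =====
def Claim_equal_solution : Prop := ∀ (sizes : List (List Int)), Dom_solution sizes → Pre_solution sizes → Spec_solution sizes (solution sizes)

-- ===== LEMMAS AND PROOFS =====

/-- max/min of a list encoded via `max?`/`min?` + `getD`. -/
def pvMaxd (s : List Int) : Int := (PySem.List.max? s (fun y => y)).getD 0
def pvMind (s : List Int) : Int := (PySem.List.min? s (fun y => y)).getD 0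

theorem foldl_max_shift (u : List Int) (s y : Int) :
    u.foldl max (max s y) = max s (u.foldl max y) := by
  induction u generalizing y with
  | nil => rfl
  | cons a t ih => simp [List.foldl, max_assoc, ih]

/-- `max` over a concatenation of nonempty lists. -/
theorem pvMaxd_append (x : Int) (t : List Int) (y : Int) (u : List Int) :
    pvMaxd ((x :: t) ++ (y :: u)) = max (pvMaxd (x :: t)) (pvMaxd (y :: u)) := by
  simp only [pvMaxd, PySem.List.max?_id_cons, Option.getD_some, List.cons_append,
    List.foldl_append]
  simp [List.foldl, foldl_max_shift]

/-- A's loop appends `pvMaxd`/`pvMind` of each card to the accumulators. -/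
theorem solution_loop_eq (sizes : List (List Int)) (h0 l0 : List Int) :
    sizes.foldl
      (fun (p : List Int × List Int) s =>
        (p.1 ++ [pvMaxd s], p.2 ++ [pvMind s])) (h0, l0)
    = (h0 ++ sizes.map pvMaxd, l0 ++ sizes.map pvMind) := by
  induction sizes generalizing h0 l0 with
  | nil => simp
  | cons s t ih => simp [List.foldl, ih]

/-- The recursion `pvRect` computes the two maxima over its index segment. -/
theorem pvRect_eq (sizes : List (List Int)) (fuel lo hi : Nat)
    (hf : hi - lo ≤ fuel) (h1 : lo < hi) (h2 : hi ≤ sizes.length) :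
    pvRect sizes fuel lo hi
      = (pvMaxd (((sizes.drop lo).take (hi - lo)).map pvMaxd),
         pvMaxd (((sizes.drop lo).take (hi - lo)).map pvMind)) := by
  induction fuel generalizing lo hi with
  | zero => omega
  | succ fuel ih =>
    by_cases hne : lo + 1 = hi
    · subst hne
      have hlt : lo < sizes.length := by omega
      have hseg : (sizes.drop lo).take (lo + 1 - lo) = [sizes[lo]] := by
        have h : lo + 1 - lo = 1 := by omega
        rw [h, List.take_one, List.head?_drop]
        simp [List.getElem?_eq_getElem hlt]
      rw [pvRect, if_neg (by omega : ¬ lo + 1 ≤ lo), if_pos rfl, hseg]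
      simp [pvMaxd, pvMind, PySem.List.max?_id_cons, PySem.List.pyGetD_natCast,
        List.getD_eq_getElem?_getD, List.getElem?_eq_getElem hlt, List.foldl]
    · set mid := (lo + hi) / 2 with hmiddef
      have hge2 : lo + 2 ≤ hi := by omega
      have hmid1 : lo < mid := by omega
      have hmid2 : mid < hi := by omega
      rw [pvRect]
      simp only [if_neg (by omega : ¬ hi ≤ lo), if_neg hne]
      rw [ih _ _ (by omega) hmid1 (by omega), ih _ _ (by omega) hmid2 h2]
      have hsplit : (sizes.drop lo).take (hi - lo)
          = (sizes.drop lo).take (mid - lo) ++ ((sizes.drop mid).take (hi - mid)) := by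
        have h3 : hi - lo = (mid - lo) + (hi - mid) := by omega
        have h4 : lo + (mid - lo) = mid := by omega
        rw [h3, List.take_add, List.drop_drop, h4]
      rw [hsplit]
      have hne1 : ((sizes.drop lo).take (mid - lo)) ≠ [] := by
        simp only [ne_eq, List.take_eq_nil_iff, List.drop_eq_nil_iff]
        omega
      have hne2 : ((sizes.drop mid).take (hi - mid)) ≠ [] := by
        simp only [ne_eq, List.take_eq_nil_iff, List.drop_eq_nil_iff]
        omega
      obtain ⟨a, as, hA⟩ := List.exists_cons_of_ne_nil hne1
      obtain ⟨b, bs, hB⟩ := List.exists_cons_of_ne_nil hne2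
      rw [hA, hB]
      simp only [List.map_append, List.map_cons]
      rw [pvMaxd_append, pvMaxd_append]

-- ===== VERDICT (by name: the statement is the Claim_ definition above) =====
theorem solution_spec : Claim_equal_solution := by
  intro sizes _ hpre
  unfold Spec_solution
  match sizes with
  | [] => exact absurd rfl hpre.1
  | s :: rest =>
    unfold solution solution_alt
    rw [PySem.List.foldl_pyRange_zero_pyGetD' (s :: rest) ([] : List Int)
      (fun (p : List Int × List Int) t =>
        (p.1 ++ [(PySem.List.max? t (fun y => y)).getD 0],
         p.2 ++ [(PySem.List.min? t (fun y => y)).getD 0])) (([], []) : List Int × List Int)]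
    rw [show (fun (p : List Int × List Int) t =>
          (p.1 ++ [(PySem.List.max? t (fun y => y)).getD 0],
           p.2 ++ [(PySem.List.min? t (fun y => y)).getD 0]))
        = (fun (p : List Int × List Int) t =>
          (p.1 ++ [pvMaxd t], p.2 ++ [pvMind t])) from rfl,
       solution_loop_eq (s :: rest) [] []]
    rw [pvRect_eq (s :: rest) (s :: rest).length 0 (s :: rest).length (by omega) (by simp) le_rfl]
    simp [pvMaxd]
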